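-- pv_equiv track=rewrite | github.com/RakshithJoseph/Plivo_ML_assignment | rules.py | _split_local_using_names
-- ===== SOURCE A (Python) =====
-- from typing import List
--
-- def _split_local_using_names(local: str, names_lex: List[str]) -> str:
--     s = local.replace('.', '').replace('_', '').lower()
--     best = None
--     for name in names_lex:
--         nm = name.lower()
--         if s.endswith(nm) and len(s) > len(nm) + 2:
--             if best is None or len(nm) > len(best):
--                 best = nm
--     if best:
--         first = s[:-len(best)]
--         return first + '.' + best
--     return local
-- ===== SOURCE B (Python) =====
-- from typing import List
--
-- def _split_local_using_names(local: str, names_lex: List[str]) -> str: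
--     s = local.replace('.', '').replace('_', '').lower()
--     name_set = {n.lower() for n in names_lex}
--     for L in sorted({len(n) for n in name_set}, reverse=True):
--         if 1 <= L <= len(s) - 3 and s[len(s) - L:] in name_set:
--             cut = len(s) - L
--             return s[:cut] + '.' + s[cut:]
--     return local
-- ===== Notes on version B (the rewrite author's own statement) =====
-- stated objective: alternative
-- what changed: Instead of scanning every name with endswith and tracking the longest match so far, B builds a set of lowercased names once and walks the distinct name lengths in descending order, returning at the first suffix of the normalized string found in the set (which is the longest qualifying one).
import Mathlib
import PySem

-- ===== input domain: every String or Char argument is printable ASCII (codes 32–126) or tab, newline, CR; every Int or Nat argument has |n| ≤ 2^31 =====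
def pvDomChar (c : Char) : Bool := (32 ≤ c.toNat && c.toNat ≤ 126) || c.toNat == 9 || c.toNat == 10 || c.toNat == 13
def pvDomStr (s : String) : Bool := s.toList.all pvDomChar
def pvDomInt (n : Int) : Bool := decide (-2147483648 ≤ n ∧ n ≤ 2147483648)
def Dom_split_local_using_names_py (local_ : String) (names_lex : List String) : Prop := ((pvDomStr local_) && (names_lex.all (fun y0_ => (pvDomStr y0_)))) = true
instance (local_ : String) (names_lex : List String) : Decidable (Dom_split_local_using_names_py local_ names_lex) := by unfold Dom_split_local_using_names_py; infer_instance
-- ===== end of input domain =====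

-- B replaces A's scan over all names (endswith + longest-so-far) by a set of lowered names and a
-- descending scan over candidate suffix lengths, returning at the first (longest) suffix in the set.


-- ===== PORT A =====
-- s = local.replace('.', '').replace('_', '').lower()   (on code points)
def pvNormA (local_ : String) : List Char :=
  PySem.Chars.lower (PySem.Chars.replace (PySem.Chars.replace local_.toList ['.'] []) ['_'] [])

-- the 'for name in names_lex' loop carrying 'best'
def pvLoopA (s : List Char) (best : Option (List Char)) : List String → Option (List Char)
  | [] => best
  | name :: rest =>
      let nm := PySem.Chars.lower name.toList
      let best' :=
        if PySem.Chars.endswith s nm && decide (s.length > nm.length + 2) then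
          match best with
          | none => some nm
          | some b => if nm.length > b.length then some nm else some b
        else best
      pvLoopA s best' rest

def split_local_using_names_py (local_ : String) (names_lex : List String) : String :=
  let s := pvNormA local_
  match pvLoopA s none names_lex with
  | some b =>
      if b ≠ [] then  -- Python truthiness of 'best'
        String.ofList (PySem.Chars.slice s none (some (-(b.length : Int))) ++ '.' :: b)
      else local_
  | none => local_

-- ===== PORT B =====
def pvNormB (local_ : String) : List Char :=
  PySem.Chars.lower (PySem.Chars.replace (PySem.Chars.replace local_.toList ['.'] []) ['_'] [])

-- name_set = {n.lower() for n in names_lex}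
def pvNameSetB (names_lex : List String) : PySem.Set String :=
  PySem.Set.ofList (names_lex.map PySem.Str.lower)

-- sorted({len(n) for n in name_set}, reverse=True)
def pvLensB (names_lex : List String) : List Nat :=
  PySem.List.sorted
    (PySem.Set.ofList ((names_lex.map PySem.Str.lower).map (fun t => t.toList.length)))
    (fun x => x) true

-- 'for L in …: if 1 <= L <= len(s)-3 and s[len(s)-L:] in name_set: return …'
def pvFindB (s : List Char) (st : PySem.Set String) : List Nat → Option Nat
  | [] => none
  | L :: rest =>
      if 1 ≤ L ∧ (L : Int) ≤ (s.length : Int) - 3 ∧ String.ofList (s.drop (s.length - L)) ∈ st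
      then some L else pvFindB s st rest

def split_local_using_names_py_alt (local_ : String) (names_lex : List String) : String :=
  let s := pvNormB local_
  let st := pvNameSetB names_lex
  match pvFindB s st (pvLensB names_lex) with
  | some L => String.ofList (s.take (s.length - L) ++ '.' :: s.drop (s.length - L))
  | none => local_

-- ===== PRECONDITION & SPEC =====
def Spec_split_local_using_names_py (local_ : String) (names_lex : List String) (out : String) : Prop := out = split_local_using_names_py_alt local_ names_lex
instance (local_ : String) (names_lex : List String) (out : String) : Decidable (Spec_split_local_using_names_py local_ names_lex out) := by unfold Spec_split_local_using_names_py; infer_instance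

-- ===== CLAIM (what is proved, stated in full; the proofs are below) =====
def Claim_equal_split_local_using_names_py : Prop := ∀ (local_ : String) (names_lex : List String), Dom_split_local_using_names_py local_ names_lex → Spec_split_local_using_names_py local_ names_lex (split_local_using_names_py local_ names_lex)

-- ===== LEMMAS AND PROOFS =====

-- the suffix of s of length L
def pvSufx (s : List Char) (L : Nat) : List Char := s.drop (s.length - L)

-- merge of two optional lengths, taking the max
def pvOmax : Option Nat → Option Nat → Option Nat
  | none, b => b
  | some a, none => some a
  | some a, some b => some (max a b)

-- lengths of the qualifying lowered names of the list (A's acceptance condition)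
def pvCand (s : List Char) (ns : List String) : List Nat :=
  ((ns.map (fun n => PySem.Chars.lower n.toList)).filter
    (fun nm => PySem.Chars.endswith s nm && decide (s.length > nm.length + 2))).map List.length

theorem pvOmax_assoc (a b c : Option Nat) : pvOmax (pvOmax a b) c = pvOmax a (pvOmax b c) := by
  rcases a <;> rcases b <;> rcases c <;> simp [pvOmax, Nat.max_assoc]

theorem pvSufx_suffix (s : List Char) (L : Nat) : pvSufx s L <:+ s := List.drop_suffix _ _

theorem pvSufx_length (s : List Char) (L : Nat) (h : L ≤ s.length) : (pvSufx s L).length = L := by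
  simp [pvSufx]; omega

theorem suffix_eq_pvSufx {nm s : List Char} (h : nm <:+ s) : nm = pvSufx s nm.length :=
  List.suffix_iff_eq_drop.mp h

theorem max?_cons_pvOmax (a : Nat) (l : List Nat) :
    (a :: l).max? = pvOmax (some a) l.max? := by
  rw [List.max?_cons]
  cases l.max? <;> simp [pvOmax]

-- loop A computes the max qualifying length (as a suffix of s)
theorem pvLoopA_eq (s : List Char) (ns : List String) :
    ∀ best : Option (List Char),
      (∀ b, best = some b → b = pvSufx s b.length) →
      pvLoopA s best ns
        = (pvOmax (best.map List.length) (pvCand s ns).max?).map (pvSufx s) := by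
  induction ns with
  | nil =>
    intro best hinv
    rcases best with _ | b
    · simp [pvLoopA, pvCand, pvOmax]
    · have hb := hinv b rfl
      simp only [pvLoopA, pvCand, List.map_nil, List.filter_nil, List.max?_nil, Option.map_some,
        pvOmax]
      exact congrArg some hb
  | cons name rest ih =>
    intro best hinv
    simp only [pvLoopA]
    by_cases hq : (PySem.Chars.endswith s (PySem.Chars.lower name.toList)
        && decide (s.length > (PySem.Chars.lower name.toList).length + 2)) = true
    · -- the name qualifies
      have hsuf : PySem.Chars.lower name.toList <:+ s := by
        have := (Bool.and_eq_true _ _).mp hq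
        exact (PySem.Chars.endswith_iff _ _).mp this.1
      have hnm : PySem.Chars.lower name.toList
          = pvSufx s (PySem.Chars.lower name.toList).length := suffix_eq_pvSufx hsuf
      have hcand : pvCand s (name :: rest)
          = (PySem.Chars.lower name.toList).length :: pvCand s rest := by
        simp [pvCand, hq]
      rcases best with _ | b
      · simp only [hq, if_true]
        rw [ih (some (PySem.Chars.lower name.toList))
          (by intro b hb; cases hb; exact hnm)]
        rw [hcand, max?_cons_pvOmax]
        rfl
      · have hb := hinv b rfl
        by_cases hlen : (PySem.Chars.lower name.toList).length > b.length
        · simp only [hq, if_true, hlen]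
          rw [ih (some (PySem.Chars.lower name.toList))
            (by intro b' hb'; cases hb'; exact hnm)]
          rw [hcand, max?_cons_pvOmax, ← pvOmax_assoc]
          have he : pvOmax (some b.length) (some (PySem.Chars.lower name.toList).length)
              = some (PySem.Chars.lower name.toList).length := by
            simp [pvOmax]; omega
          simp only [Option.map_some]
          rw [he]
        · simp only [hq, if_true, hlen, if_false]
          rw [ih (some b) (by intro b' hb'; cases hb'; exact hb)]
          rw [hcand, max?_cons_pvOmax, ← pvOmax_assoc]
          have he : pvOmax (some b.length) (some (PySem.Chars.lower name.toList).length)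
              = some b.length := by
            simp [pvOmax]; omega
          simp only [Option.map_some]
          rw [he]
    · -- the name does not qualify
      have hcand : pvCand s (name :: rest) = pvCand s rest := by
        simp [pvCand, hq]
      simp only [hq, Bool.false_eq_true, if_false]
      rw [ih best hinv, hcand]

-- membership in B's set, unfolded
theorem mem_pvNameSetB (names_lex : List String) (cs : List Char) :
    String.ofList cs ∈ pvNameSetB names_lex ↔ ∃ n ∈ names_lex, PySem.Chars.lower n.toList = cs := by
  rw [pvNameSetB, PySem.Set.mem_ofList]
  simp only [List.mem_map]
  constructor
  · rintro ⟨n, hn, he⟩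
    exact ⟨n, hn, by simpa [String.ext_iff] using he⟩
  · rintro ⟨n, hn, he⟩
    exact ⟨n, hn, by simp [String.ext_iff, ← he]⟩

-- B's scan returns none when no listed length qualifies
theorem pvFindB_eq_none (s : List Char) (st : PySem.Set String) (lp : List Nat)
    (h : ∀ L ∈ lp, ¬ (1 ≤ L ∧ (L : Int) ≤ (s.length : Int) - 3
          ∧ String.ofList (s.drop (s.length - L)) ∈ st)) :
    pvFindB s st lp = none := by
  induction lp with
  | nil => rfl
  | cons L0 rest ih =>
    rw [pvFindB, if_neg (h L0 (List.mem_cons_self))]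
    exact ih (fun L hL => h L (List.mem_cons_of_mem _ hL))

-- on a descending list, B's scan returns the maximal qualifying length
theorem pvFindB_eq_some (s : List Char) (st : PySem.Set String) (lp : List Nat)
    (hp : lp.Pairwise (fun a b => b ≤ a)) (K : Nat) (hKmem : K ∈ lp)
    (hPK : 1 ≤ K ∧ (K : Int) ≤ (s.length : Int) - 3 ∧ String.ofList (s.drop (s.length - K)) ∈ st)
    (hmax : ∀ L ∈ lp, (1 ≤ L ∧ (L : Int) ≤ (s.length : Int) - 3
          ∧ String.ofList (s.drop (s.length - L)) ∈ st) → L ≤ K) :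
    pvFindB s st lp = some K := by
  induction lp with
  | nil => cases hKmem
  | cons L0 rest ih =>
    rw [List.pairwise_cons] at hp
    by_cases hP0 : 1 ≤ L0 ∧ (L0 : Int) ≤ (s.length : Int) - 3
        ∧ String.ofList (s.drop (s.length - L0)) ∈ st
    · have hle : L0 ≤ K := hmax L0 List.mem_cons_self hP0
      have hge : K ≤ L0 := by
        rcases List.mem_cons.mp hKmem with h | h
        · omega
        · exact hp.1 K h
      have hLK : L0 = K := le_antisymm hle hge
      rw [pvFindB, if_pos hP0, hLK]
    · have hKr : K ∈ rest := by
        rcases List.mem_cons.mp hKmem with h | h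
        · exact absurd (h ▸ hPK) hP0
        · exact h
      rw [pvFindB, if_neg hP0]
      exact ih hp.2 hKr (fun L hL => hmax L (List.mem_cons_of_mem _ hL))

-- the candidate length list: membership and order
theorem mem_pvLensB (names_lex : List String) (K : Nat) :
    K ∈ pvLensB names_lex ↔ ∃ n ∈ names_lex, (PySem.Chars.lower n.toList).length = K := by
  simp only [pvLensB, PySem.List.mem_sorted, PySem.Set.mem_ofList, List.mem_map]
  constructor
  · rintro ⟨a, ⟨n, hn, rfl⟩, hl⟩
    exact ⟨n, hn, by simpa using hl⟩
  · rintro ⟨n, hn, hl⟩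
    exact ⟨PySem.Str.lower n, ⟨n, hn, rfl⟩, by simpa using hl⟩

theorem pvLensB_pairwise (names_lex : List String) :
    (pvLensB names_lex).Pairwise (fun a b => b ≤ a) :=
  PySem.List.sorted_pairwise_rev _ _

-- A's acceptance condition, as a statement about suffix lengths
theorem pvCand_mem_iff (s : List Char) (ns : List String) (L : Nat) :
    L ∈ pvCand s ns ↔ (L + 3 ≤ s.length ∧ ∃ n ∈ ns, PySem.Chars.lower n.toList = pvSufx s L) := by
  simp only [pvCand, List.mem_map, List.mem_filter, Bool.and_eq_true, decide_eq_true_eq]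
  constructor
  · rintro ⟨nm, ⟨⟨n, hn, rfl⟩, hend, hlen⟩, rfl⟩
    refine ⟨by omega, n, hn, ?_⟩
    exact suffix_eq_pvSufx ((PySem.Chars.endswith_iff _ _).mp hend)
  · rintro ⟨h3, n, hn, he⟩
    refine ⟨PySem.Chars.lower n.toList, ⟨⟨n, hn, rfl⟩, ?_, ?_⟩, ?_⟩
    · rw [he]; exact (PySem.Chars.endswith_iff _ _).mpr (pvSufx_suffix s L)
    · rw [he, pvSufx_length s L (by omega)]; omega
    · rw [he]; exact pvSufx_length s L (by omega)

-- the two results agree (the heart of the claim)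
theorem pv_key (local_ : String) (names : List String) :
    split_local_using_names_py local_ names = split_local_using_names_py_alt local_ names := by
  have hnorm : pvNormB local_ = pvNormA local_ := rfl
  simp only [split_local_using_names_py, split_local_using_names_py_alt, hnorm]
  set s := pvNormA local_ with hs
  have hA := pvLoopA_eq s names none (by intro b hb; cases hb)
  simp only [Option.map_none] at hA
  rcases hmax : (pvCand s names).max? with _ | K
  · -- no name qualifies: both return local_
    rw [hmax] at hA
    have hB : pvFindB s (pvNameSetB names) (pvLensB names) = none := by
      apply pvFindB_eq_none
      rintro L hL ⟨h1, h2, hmem⟩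
      obtain ⟨n, hn, he⟩ := (mem_pvNameSetB names _).mp hmem
      have hLc : L ∈ pvCand s names :=
        (pvCand_mem_iff s names L).mpr ⟨by omega, n, hn, he⟩
      rw [List.max?_eq_none_iff] at hmax
      rw [hmax] at hLc
      exact (List.not_mem_nil hLc)
    simp [hA, hB, pvOmax]
  · -- the longest qualifying length is K
    rw [hmax] at hA
    obtain ⟨hKin, hKub⟩ := List.max?_eq_some_iff.mp hmax
    obtain ⟨hK3, n, hn, hne⟩ := (pvCand_mem_iff s names K).mp hKin
    by_cases hK0 : K = 0
    · -- only the empty name qualifies: best is falsy, and B's scan finds nothing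
      subst hK0
      have hB : pvFindB s (pvNameSetB names) (pvLensB names) = none := by
        apply pvFindB_eq_none
        rintro L hL ⟨h1, h2, hmem⟩
        obtain ⟨n', hn', he'⟩ := (mem_pvNameSetB names _).mp hmem
        have hLc : L ∈ pvCand s names :=
          (pvCand_mem_iff s names L).mpr ⟨by omega, n', hn', he'⟩
        have := hKub L hLc
        omega
      have hnil : pvSufx s 0 = [] := by simp [pvSufx]
      simp [hA, hB, pvOmax, hnil]
    · -- K ≥ 1: both split s at length K from the right
      have hKlen : (pvSufx s K).length = K := pvSufx_length s K (by omega)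
      have hB : pvFindB s (pvNameSetB names) (pvLensB names) = some K := by
        refine pvFindB_eq_some s _ _ (pvLensB_pairwise names) K ?_ ?_ ?_
        · exact (mem_pvLensB names K).mpr ⟨n, hn, by rw [hne]; exact hKlen⟩
        · refine ⟨by omega, by omega, ?_⟩
          exact (mem_pvNameSetB names _).mpr ⟨n, hn, hne⟩
        · rintro L hL ⟨h1, h2, hmem⟩
          obtain ⟨n', hn', he'⟩ := (mem_pvNameSetB names _).mp hmem
          have hLc : L ∈ pvCand s names :=
            (pvCand_mem_iff s names L).mpr ⟨by omega, n', hn', he'⟩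
          have := hKub L hLc
          omega
      have hne' : pvSufx s K ≠ [] := by
        intro h
        rw [h] at hKlen
        simp at hKlen
        omega
      have hslice : PySem.Chars.slice s none (some (-((pvSufx s K).length : Int)))
          = s.take (s.length - K) := by
        rw [hKlen, PySem.Chars.slice_eq_listSlice,
          PySem.List.slice_to_neg_natCast s K (by omega)]
      simp only [hA, hB, pvOmax, Option.map_some]
      rw [if_pos hne', hslice]
      rfl

-- ===== VERDICT (by name: the statement is the Claim_ definition above) =====
theorem split_local_using_names_py_spec : Claim_equal_split_local_using_names_py := by
  intro local_ names _
  exact pv_key local_ names
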